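-- pv_equiv track=rewrite | github.com/happymadscientist/infinityChessboard | python/chessboardWebController.py | getCoordsOffsetDir
-- ===== SOURCE A (Python) =====
-- def getCoordsOffsetDir(startingCoord,offset):
-- 	#check if the offset is in the x dir
-- 	dx = offset[0]
-- 	if dx:
-- 		direction = (dx>0)
-- 		if direction: direction = 1
-- 		else: direction = -1
--
-- 		newXs = range(startingCoord[0],startingCoord[0]+dx,direction)
-- 		newYs = [startingCoord[1]]*abs(dx)
-- 	else:
-- 		dy = offset[1]
-- 		direction = dy>0
-- 		if direction: direction = 1
-- 		else: direction = -1
--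
-- 		newYs = range(startingCoord[1],startingCoord[1]+dy,direction)
-- 		newXs = [startingCoord[0]]*abs(dy)
--
-- 	coordsOut = [(x,y) for x,y in zip(newXs,newYs)]
-- 	return coordsOut
-- ===== SOURCE B (Python) =====
-- def getCoordsOffsetDir(startingCoord, offset):
--     # State-machine walk: consume the residual signed offset down to zero,
--     # emitting the current position and moving it one step each iteration,
--     # instead of precomputing a range and a replicated list and zipping them.
--     x, y = startingCoord
--     dx, dy = offset
--     out = []
--     if dx:
--         while dx:
--             out.append((x, y))
--             step = 1 if dx > 0 else -1
--             x += step
--             dx -= step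
--     else:
--         while dy:
--             out.append((x, y))
--             step = 1 if dy > 0 else -1
--             y += step
--             dy -= step
--     return out
-- ===== Notes on version B (the rewrite author's own statement) =====
-- stated objective: alternative
-- what changed: Replaces A's staged construction (a range object, a replicated list, then a zip comprehension) by a state-machine walk that mutates the current position while consuming the residual signed offset down to zero, with no precomputed length or sequences.
import Mathlib
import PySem

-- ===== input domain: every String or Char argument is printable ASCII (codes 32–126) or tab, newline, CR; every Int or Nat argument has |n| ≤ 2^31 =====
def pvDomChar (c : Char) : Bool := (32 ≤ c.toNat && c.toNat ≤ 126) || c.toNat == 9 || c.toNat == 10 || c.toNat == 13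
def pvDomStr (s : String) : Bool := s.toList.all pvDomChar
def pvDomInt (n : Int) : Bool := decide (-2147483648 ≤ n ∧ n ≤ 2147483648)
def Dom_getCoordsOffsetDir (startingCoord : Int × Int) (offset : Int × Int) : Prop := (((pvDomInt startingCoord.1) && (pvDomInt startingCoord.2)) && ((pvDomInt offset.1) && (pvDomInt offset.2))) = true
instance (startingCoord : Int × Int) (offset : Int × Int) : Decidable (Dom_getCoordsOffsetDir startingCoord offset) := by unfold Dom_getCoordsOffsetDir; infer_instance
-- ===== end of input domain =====

-- B replaces A's staged range/replicate/zip construction by a state-machine walk that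
-- consumes the residual signed offset down to zero (objective: alternative).

-- ===== PORT A =====
def getCoordsOffsetDir (startingCoord : Int × Int) (offset : Int × Int) : List (Int × Int) :=
  let dx := offset.1
  if dx ≠ 0 then
    let direction : Int := if dx > 0 then 1 else -1
    let newXs := PySem.List.pyRange startingCoord.1 (startingCoord.1 + dx) direction
    let newYs := List.replicate dx.natAbs startingCoord.2
    (newXs.zip newYs).map (fun xy => (xy.1, xy.2))
  else
    let dy := offset.2
    let direction : Int := if dy > 0 then 1 else -1
    let newYs := PySem.List.pyRange startingCoord.2 (startingCoord.2 + dy) direction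
    let newXs := List.replicate dy.natAbs startingCoord.1
    (newXs.zip newYs).map (fun xy => (xy.1, xy.2))

-- ===== PORT B =====
-- 'while dx:' on the mutable state (x, dx) becomes structural recursion on the same state.
def pvWalkX (x y dx : Int) : List (Int × Int) :=
  if h : dx = 0 then []
  else
    let step : Int := if dx > 0 then 1 else -1
    (x, y) :: pvWalkX (x + step) y (dx - step)
termination_by dx.natAbs
decreasing_by split <;> omega

def pvWalkY (x y dy : Int) : List (Int × Int) :=
  if h : dy = 0 then []
  else
    let step : Int := if dy > 0 then 1 else -1
    (x, y) :: pvWalkY x (y + step) (dy - step)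
termination_by dy.natAbs
decreasing_by split <;> omega

def getCoordsOffsetDir_alt (startingCoord : Int × Int) (offset : Int × Int) : List (Int × Int) :=
  if offset.1 ≠ 0 then pvWalkX startingCoord.1 startingCoord.2 offset.1
  else pvWalkY startingCoord.1 startingCoord.2 offset.2

-- ===== PRECONDITION & SPEC =====
def Spec_getCoordsOffsetDir (startingCoord : Int × Int) (offset : Int × Int) (out : List (Int × Int)) : Prop := out = getCoordsOffsetDir_alt startingCoord offset
instance (startingCoord : Int × Int) (offset : Int × Int) (out : List (Int × Int)) : Decidable (Spec_getCoordsOffsetDir startingCoord offset out) := by unfold Spec_getCoordsOffsetDir; infer_instance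

-- ===== CLAIM (what is proved, stated in full; the proofs are below) =====
def Claim_equal_getCoordsOffsetDir : Prop := ∀ (startingCoord : Int × Int) (offset : Int × Int), Dom_getCoordsOffsetDir startingCoord offset → Spec_getCoordsOffsetDir startingCoord offset (getCoordsOffsetDir startingCoord offset)

-- ===== LEMMAS AND PROOFS =====

-- zipping a range-map with a same-length replicate is a single map producing pairs
theorem zip_map_replicate {β γ : Type} (n : Nat) (f : Nat → β) (y : γ) :
    (((List.range n).map f).zip (List.replicate n y)) = (List.range n).map (fun k => (f k, y)) := by
  rw [show List.replicate n y = (List.range n).map (fun _ => y) by simp [List.map_const'], List.zip_map']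

theorem replicate_zip_map {β γ : Type} (n : Nat) (f : Nat → β) (y : γ) :
    ((List.replicate n y).zip ((List.range n).map f)) = (List.range n).map (fun k => (y, f k)) := by
  rw [show List.replicate n y = (List.range n).map (fun _ => y) by simp [List.map_const'], List.zip_map']

-- A's x-branch expression as a closed map over range
theorem line_eq (a y d : Int) (hd : d ≠ 0) :
    ((PySem.List.pyRange a (a + d) (if d > 0 then 1 else -1)).zip
        (List.replicate d.natAbs y)).map (fun xy => (xy.1, xy.2)) =
      (List.range d.natAbs).map (fun (i : Nat) => (a + (i : Int) * (if d > 0 then 1 else -1), y)) := by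
  rcases lt_trichotomy d 0 with h | h | h
  · have hif : (if d > 0 then (1:Int) else -1) = -1 := by simp [not_lt.mpr (le_of_lt h)]
    rw [hif, PySem.List.pyRange_neg_one]
    have hn : (a - (a + d)).toNat = d.natAbs := by omega
    rw [hn, zip_map_replicate]
    simp only [List.map_map]
    apply List.map_congr_left
    intro k _
    simp; ring
  · exact absurd h hd
  · have hif : (if d > 0 then (1:Int) else -1) = 1 := by simp [h]
    rw [hif, PySem.List.pyRange_one]
    have hn : (a + d - a).toNat = d.natAbs := by omega
    rw [hn, zip_map_replicate]
    simp only [List.map_map]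
    apply List.map_congr_left
    intro k _
    simp

-- A's y-branch expression as a closed map over range
theorem line_eq_y (x b d : Int) (hd : d ≠ 0) :
    ((List.replicate d.natAbs x).zip
        (PySem.List.pyRange b (b + d) (if d > 0 then 1 else -1))).map (fun xy => (xy.1, xy.2)) =
      (List.range d.natAbs).map (fun (i : Nat) => (x, b + (i : Int) * (if d > 0 then 1 else -1))) := by
  rcases lt_trichotomy d 0 with h | h | h
  · have hif : (if d > 0 then (1:Int) else -1) = -1 := by simp [not_lt.mpr (le_of_lt h)]
    rw [hif, PySem.List.pyRange_neg_one]
    have hn : (b - (b + d)).toNat = d.natAbs := by omega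
    rw [hn, replicate_zip_map]
    simp only [List.map_map]
    apply List.map_congr_left
    intro k _
    simp; ring
  · exact absurd h hd
  · have hif : (if d > 0 then (1:Int) else -1) = 1 := by simp [h]
    rw [hif, PySem.List.pyRange_one]
    have hn : (b + d - b).toNat = d.natAbs := by omega
    rw [hn, replicate_zip_map]
    simp only [List.map_map]
    apply List.map_congr_left
    intro k _
    simp

-- B's walk as the same closed map, by induction on |d|
theorem pvWalkX_eq (n : Nat) : ∀ (x y d : Int), d.natAbs = n →
    pvWalkX x y d = (List.range n).map (fun (i : Nat) => (x + (i : Int) * (if d > 0 then 1 else -1), y)) := by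
  induction n with
  | zero =>
    intro x y d hd
    have : d = 0 := by omega
    rw [pvWalkX.eq_def]; simp [this]
  | succ m ih =>
    intro x y d hd
    have hd0 : d ≠ 0 := by omega
    rw [pvWalkX.eq_def, dif_neg hd0]
    set s : Int := if d > 0 then 1 else -1 with hs
    have hds : (d - s).natAbs = m := by rw [hs]; split <;> omega
    show ((x, y) :: pvWalkX (x + s) y (d - s)) = _
    rw [ih (x + s) y (d - s) hds]
    rw [List.range_succ_eq_map, List.map_cons, List.map_map]
    congr 1
    · simp
    · apply List.map_congr_left
      intro k hk
      have hkm : k < m := List.mem_range.mp hk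
      have hds0 : d - s ≠ 0 := by omega
      have hsame : (if d - s > 0 then (1:Int) else -1) = s := by
        rw [hs]; rcases lt_trichotomy d 0 with h | h | h <;> split <;> split <;> omega
      simp only [Function.comp, hsame, Prod.mk.injEq, Nat.succ_eq_add_one, true_and, and_true]
      push_cast; ring

theorem pvWalkY_eq (n : Nat) : ∀ (x y d : Int), d.natAbs = n →
    pvWalkY x y d = (List.range n).map (fun (i : Nat) => (x, y + (i : Int) * (if d > 0 then 1 else -1))) := by
  induction n with
  | zero =>
    intro x y d hd
    have : d = 0 := by omega
    rw [pvWalkY.eq_def]; simp [this]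
  | succ m ih =>
    intro x y d hd
    have hd0 : d ≠ 0 := by omega
    rw [pvWalkY.eq_def, dif_neg hd0]
    set s : Int := if d > 0 then 1 else -1 with hs
    have hds : (d - s).natAbs = m := by rw [hs]; split <;> omega
    show ((x, y) :: pvWalkY x (y + s) (d - s)) = _
    rw [ih x (y + s) (d - s) hds]
    rw [List.range_succ_eq_map, List.map_cons, List.map_map]
    congr 1
    · simp
    · apply List.map_congr_left
      intro k hk
      have hkm : k < m := List.mem_range.mp hk
      have hds0 : d - s ≠ 0 := by omega
      have hsame : (if d - s > 0 then (1:Int) else -1) = s := by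
        rw [hs]; rcases lt_trichotomy d 0 with h | h | h <;> split <;> split <;> omega
      simp only [Function.comp, hsame, Prod.mk.injEq, Nat.succ_eq_add_one, true_and, and_true]
      push_cast; ring

-- ===== VERDICT (by name: the statement is the Claim_ definition above) =====
theorem getCoordsOffsetDir_spec : Claim_equal_getCoordsOffsetDir := by
  unfold Claim_equal_getCoordsOffsetDir
  intro sc off _
  unfold Spec_getCoordsOffsetDir getCoordsOffsetDir getCoordsOffsetDir_alt
  by_cases hdx : off.1 ≠ 0
  · rw [if_pos hdx, if_pos hdx]
    rw [line_eq sc.1 sc.2 off.1 hdx, pvWalkX_eq off.1.natAbs sc.1 sc.2 off.1 rfl]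
  · rw [if_neg hdx, if_neg hdx]
    simp only [not_not] at hdx
    by_cases hdy : off.2 = 0
    · rw [pvWalkY.eq_def]; simp [hdy]
    · rw [line_eq_y sc.1 sc.2 off.2 hdy, pvWalkY_eq off.2.natAbs sc.1 sc.2 off.2 rfl]
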